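-- pv_equiv track=rewrite | github.com/mathslug/slonkNugz | scan.py | group_by_entity
-- ===== SOURCE A (Python) =====
-- def group_by_entity(markets: list[dict]) -> dict[str, list[dict]]:
--     """Group markets by yes_sub_title (entity).
--
--     Only keeps entities that appear in 2+ different series, since same-series
--     markets can't form implication relationships.
--     """
--     groups: dict[str, list[dict]] = {}
--     for m in markets:
--         entity = m.get("yes_sub_title", "").strip()
--         if not entity:
--             continue
--         groups.setdefault(entity, []).append(m)
--
--     # Filter to entities in 2+ series
--     multi_series = {}
--     for entity, entity_markets in groups.items():
--         series_set = {m["series_ticker"] for m in entity_markets}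
--         if len(series_set) >= 2:
--             multi_series[entity] = entity_markets
--
--     return multi_series
-- ===== SOURCE B (Python) =====
-- def group_by_entity(markets: list[dict]) -> dict[str, list[dict]]:
--     """Group markets by yes_sub_title (entity), keep entities seen in 2+ series.
--
--     One pass: alongside each group, keep (first series seen, flag: a different
--     series was seen) instead of rebuilding a series set per group afterwards.
--     """
--     groups: dict[str, list[dict]] = {}
--     info: dict[str, tuple] = {}  # entity -> (first series seen, multi-series flag)
--     for m in markets:
--         entity = m.get("yes_sub_title", "").strip()
--         if not entity:
--             continue
--         groups.setdefault(entity, []).append(m)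
--         s = m["series_ticker"]
--         if entity not in info:
--             info[entity] = (s, False)
--         else:
--             first, multi = info[entity]
--             if s != first:
--                 info[entity] = (first, True)
--     return {e: ms for e, ms in groups.items() if info[e][1]}
-- ===== Notes on version B (the rewrite author's own statement) =====
-- stated objective: alternative
-- what changed: B makes a single pass that, next to each group, maintains (first series seen, a flag that a different series appeared), so A's second pass rebuilding a series set per group is replaced by an O(1) flag test; Pre_ only excludes inputs where A raises KeyError (a non-empty-entity market lacking 'series_ticker'), where B raises too.
import Mathlib
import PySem

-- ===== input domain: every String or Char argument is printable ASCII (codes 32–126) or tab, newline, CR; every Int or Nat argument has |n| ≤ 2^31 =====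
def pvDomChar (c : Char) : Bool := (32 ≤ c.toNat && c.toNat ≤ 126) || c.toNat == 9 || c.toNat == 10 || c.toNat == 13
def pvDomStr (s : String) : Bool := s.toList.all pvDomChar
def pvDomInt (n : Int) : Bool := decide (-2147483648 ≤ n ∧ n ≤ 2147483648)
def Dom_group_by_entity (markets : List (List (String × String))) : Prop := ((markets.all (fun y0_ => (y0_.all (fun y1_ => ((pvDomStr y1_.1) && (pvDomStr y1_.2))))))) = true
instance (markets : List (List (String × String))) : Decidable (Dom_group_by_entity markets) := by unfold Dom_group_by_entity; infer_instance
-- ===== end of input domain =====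

-- B replaces A's second pass (rebuild a series set per group) by a per-group
-- (first series, different-series-seen flag) maintained in the single grouping pass.
-- A mutates nothing observable; equivalence is about the return value.

-- ===== PORT A =====
-- shared accessors: m.get("yes_sub_title", "").strip()  and  m["series_ticker"]
def pvEntity (m : List (String × String)) : String :=
  PySem.Str.strip ((PySem.Dict.mk m).getD "yes_sub_title" "")
-- m["series_ticker"]: KeyError (= none) is excluded by Pre_; getD "" is the total form
def pvSeries (m : List (String × String)) : String :=
  ((PySem.Dict.mk m).get? "series_ticker").getD ""

def group_by_entity (markets : List (List (String × String))) : List (String × List (List (String × String))) :=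
  -- groups.setdefault(entity, []).append(m)  ≡  groups[entity] = groups.get(entity, []) + [m]
  let groups := markets.foldl
    (fun (g : PySem.Dict String (List (List (String × String)))) m =>
      let entity := pvEntity m
      if entity = "" then g
      else g.modify entity [] (· ++ [m]))
    PySem.Dict.empty
  let multi := groups.items.foldl
    (fun (acc : PySem.Dict String (List (List (String × String)))) p =>
      let seriesSet := PySem.Set.ofList (p.2.map pvSeries)
      if 2 ≤ seriesSet.length then acc.insert p.1 p.2 else acc)
    PySem.Dict.empty
  multi.items

-- ===== PORT B =====
def group_by_entity_alt (markets : List (List (String × String))) : List (String × List (List (String × String))) :=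
  let st := markets.foldl
    (fun (st : PySem.Dict String (List (List (String × String))) × PySem.Dict String (String × Bool)) m =>
      let entity := pvEntity m
      if entity = "" then st
      else
        let groups := st.1.modify entity [] (· ++ [m])
        let s := pvSeries m
        let info :=
          if st.2.contains entity = false then st.2.insert entity (s, false)
          else
            let fm := st.2.getD entity ("", false)
            if s ≠ fm.1 then st.2.insert entity (fm.1, true) else st.2
        (groups, info))
    (PySem.Dict.empty, PySem.Dict.empty)
  (st.1.items.foldl
    (fun (acc : PySem.Dict String (List (List (String × String)))) p =>
      if (st.2.getD p.1 ("", false)).2 then acc.insert p.1 p.2 else acc)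
    PySem.Dict.empty).items

-- ===== PRECONDITION & SPEC =====
-- Pre_ excludes exactly the inputs on which A raises KeyError: a market whose
-- stripped yes_sub_title is non-empty but which has no "series_ticker" key.
def Pre_group_by_entity (markets : List (List (String × String))) : Prop :=
  ∀ m ∈ markets, pvEntity m ≠ "" → (PySem.Dict.mk m).contains "series_ticker" = true
instance (markets : List (List (String × String))) : Decidable (Pre_group_by_entity markets) := by unfold Pre_group_by_entity; infer_instance

def pvWitness_group_by_entity : (List (List (String × String))) :=
  [[("yes_sub_title", " X "), ("series_ticker", "S1")],
   [("yes_sub_title", "X"), ("series_ticker", "S2")],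
   [("yes_sub_title", "")]]

def Spec_group_by_entity (markets : List (List (String × String))) (out : List (String × List (List (String × String)))) : Prop := out = group_by_entity_alt markets
instance (markets : List (List (String × String))) (out : List (String × List (List (String × String)))) : Decidable (Spec_group_by_entity markets out) := by unfold Spec_group_by_entity; infer_instance

-- ===== CLAIM (what is proved, stated in full; the proofs are below) =====
def Claim_equal_group_by_entity : Prop := ∀ (markets : List (List (String × String))), Dom_group_by_entity markets → Pre_group_by_entity markets → Spec_group_by_entity markets (group_by_entity markets)

-- ===== LEMMAS AND PROOFS =====

-- proof-side abbreviations for the two loop bodies (let-free forms of the ports' lambdas)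
def pvStepA (g : PySem.Dict String (List (List (String × String)))) (m : List (String × String)) : PySem.Dict String (List (List (String × String))) :=
  if pvEntity m = "" then g else g.modify (pvEntity m) [] (· ++ [m])

def pvInfoStep (i : PySem.Dict String (String × Bool)) (e s : String) : PySem.Dict String (String × Bool) :=
  if i.contains e = false then i.insert e (s, false)
  else if s ≠ (i.getD e ("", false)).1 then i.insert e ((i.getD e ("", false)).1, true) else i

def pvStepB (st : PySem.Dict String (List (List (String × String))) × PySem.Dict String (String × Bool)) (m : List (String × String)) : PySem.Dict String (List (List (String × String))) × PySem.Dict String (String × Bool) :=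
  if pvEntity m = "" then st
  else (st.1.modify (pvEntity m) [] (· ++ [m]), pvInfoStep st.2 (pvEntity m) (pvSeries m))

-- the relation maintained between a group's markets and its info entry
def pvInfoOk (ms : List (List (String × String))) (o : Option (String × Bool)) : Prop :=
  match ms with
  | [] => o = none
  | h :: _ => o = some (pvSeries h, ms.any (fun x => pvSeries x != pvSeries h))

def pvRel (g : PySem.Dict String (List (List (String × String)))) (i : PySem.Dict String (String × Bool)) : Prop :=
  ∀ e, pvInfoOk (g.getD e []) (i.get? e)

theorem pvStepB_fst (st : PySem.Dict String (List (List (String × String))) × PySem.Dict String (String × Bool)) (m : List (String × String)) :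
    (pvStepB st m).1 = pvStepA st.1 m := by
  unfold pvStepA pvStepB
  split <;> rfl

theorem pvFoldB_fst (markets : List (List (String × String))) (st : PySem.Dict String (List (List (String × String))) × PySem.Dict String (String × Bool)) :
    (markets.foldl pvStepB st).1 = markets.foldl pvStepA st.1 := by
  induction markets generalizing st with
  | nil => rfl
  | cons m t ih => rw [List.foldl_cons, List.foldl_cons, ih, pvStepB_fst]

theorem pvInfoStep_get?_ne (i : PySem.Dict String (String × Bool)) (e e' s : String) (hne : e' ≠ e) :
    (pvInfoStep i e s).get? e' = i.get? e' := by
  unfold pvInfoStep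
  split
  · exact PySem.Dict.get?_insert_of_ne _ _ hne
  · split
    · exact PySem.Dict.get?_insert_of_ne _ _ hne
    · rfl

theorem pvInfoOk_step (i : PySem.Dict String (String × Bool)) (e : String) (m : List (String × String))
    (ms : List (List (String × String))) (hio : pvInfoOk ms (i.get? e)) :
    pvInfoOk (ms ++ [m]) ((pvInfoStep i e (pvSeries m)).get? e) := by
  rcases ms with _ | ⟨mh, mt⟩
  · simp only [pvInfoOk] at hio
    have hc : i.contains e = false := by rw [PySem.Dict.contains_eq_isSome_get?, hio]; rfl
    unfold pvInfoStep
    split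
    · rw [PySem.Dict.get?_insert_self]
      simp [pvInfoOk]
    · rename_i hcf; exact absurd hc hcf
  · simp only [pvInfoOk] at hio
    have hgd : i.getD e ("", false) = (pvSeries mh, (mh :: mt).any (fun x => pvSeries x != pvSeries mh)) :=
      PySem.Dict.getD_of_get?_eq_some i ("", false) hio
    unfold pvInfoStep
    split
    · rename_i hcf
      rw [PySem.Dict.contains_eq_isSome_get?, hio] at hcf
      exact absurd hcf (by simp)
    · split
      · rename_i hcond
        rw [hgd] at hcond
        simp only [ne_eq] at hcond
        rw [hgd, PySem.Dict.get?_insert_self]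
        simp only [List.cons_append, pvInfoOk, List.any_cons, List.any_append, List.any_nil,
          Bool.or_false]
        simp [hcond]
      · rename_i hcond
        rw [hgd] at hcond
        simp only [ne_eq, not_not] at hcond
        rw [hio]
        simp only [List.cons_append, pvInfoOk, List.any_cons, List.any_append, List.any_nil,
          Bool.or_false]
        simp [hcond]

theorem pvRel_step (st : PySem.Dict String (List (List (String × String))) × PySem.Dict String (String × Bool)) (m : List (String × String))
    (h : pvRel st.1 st.2) : pvRel (pvStepB st m).1 (pvStepB st m).2 := by
  by_cases he : pvEntity m = ""
  · have hEq : pvStepB st m = st := by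
      unfold pvStepB; split
      · rfl
      · rename_i hcf; exact absurd he hcf
    rw [hEq]; exact h
  · have hEq : pvStepB st m
        = (st.1.modify (pvEntity m) [] (· ++ [m]), pvInfoStep st.2 (pvEntity m) (pvSeries m)) := by
      unfold pvStepB; split
      · rename_i hcf; exact absurd hcf he
      · rfl
    rw [hEq]
    intro e
    by_cases heq : e = pvEntity m
    · subst heq
      show pvInfoOk ((st.1.modify (pvEntity m) [] (· ++ [m])).getD (pvEntity m) []) _
      rw [PySem.Dict.getD_modify_self]
      exact pvInfoOk_step st.2 (pvEntity m) m (st.1.getD (pvEntity m) []) (h (pvEntity m))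
    · show pvInfoOk ((st.1.modify (pvEntity m) [] (· ++ [m])).getD e []) _
      rw [PySem.Dict.getD_modify_of_ne _ _ _ heq,
        pvInfoStep_get?_ne st.2 (pvEntity m) e (pvSeries m) heq]
      exact h e

theorem pvRel_fold (markets : List (List (String × String))) (st : PySem.Dict String (List (List (String × String))) × PySem.Dict String (String × Bool))
    (h : pvRel st.1 st.2) : pvRel (markets.foldl pvStepB st).1 (markets.foldl pvStepB st).2 := by
  induction markets generalizing st with
  | nil => exact h
  | cons m t ih => exact ih _ (pvRel_step st m h)

-- A's test "len({series}) >= 2" on a group equals B's maintained flag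
theorem pvCond_iff (mh : List (String × String)) (mt : List (List (String × String))) :
    2 ≤ (PySem.Set.ofList ((mh :: mt).map pvSeries)).length ↔
      ((mh :: mt).any (fun x => pvSeries x != pvSeries mh)) = true := by
  rw [List.map_cons, PySem.Set.ofList_cons]
  constructor
  · intro hlen
    have hne : PySem.Set.discard (PySem.Set.ofList (mt.map pvSeries)) (pvSeries mh) ≠ [] := by
      intro hnil; rw [hnil] at hlen; simp at hlen
    rcases List.exists_mem_of_ne_nil _ hne with ⟨y, hy⟩
    rw [PySem.Set.mem_discard] at hy
    rcases hy with ⟨hy1, hy2⟩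
    rw [PySem.Set.mem_ofList, List.mem_map] at hy1
    rcases hy1 with ⟨x, hx, rfl⟩
    simp only [List.any_cons, List.any_eq_true, Bool.or_eq_true]
    exact Or.inr ⟨x, hx, by simpa using hy2⟩
  · intro hany
    simp only [List.any_cons, bne_self_eq_false, Bool.false_or, List.any_eq_true, bne_iff_ne] at hany
    rcases hany with ⟨x, hx, hne⟩
    have hmem : pvSeries x ∈ PySem.Set.discard (PySem.Set.ofList (mt.map pvSeries)) (pvSeries mh) := by
      rw [PySem.Set.mem_discard, PySem.Set.mem_ofList]
      exact ⟨List.mem_map_of_mem hx, hne⟩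
    have h1 : 1 ≤ (PySem.Set.discard (PySem.Set.ofList (mt.map pvSeries)) (pvSeries mh)).length :=
      List.length_pos_of_mem hmem
    simp only [List.length_cons]
    omega

theorem pvGroups_nodup_keys (markets : List (List (String × String))) :
    (markets.foldl pvStepA PySem.Dict.empty).keys.Nodup := by
  have hrw : ∀ (d : PySem.Dict String (List (List (String × String)))),
      markets.foldl pvStepA d
        = (markets.filter (fun m => !(pvEntity m == ""))).foldl
            (fun d m => d.modify (pvEntity m) [] (· ++ [m])) d := by
    induction markets with
    | nil => intro d; rfl
    | cons m t ih =>
      intro d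
      by_cases h : pvEntity m = "" <;>
        simp [pvStepA, h, ih]
  rw [hrw]
  exact PySem.Dict.nodup_keys_foldl_modify_key _ pvEntity _ _ _ PySem.Dict.nodup_keys_empty

-- the two filtering passes agree on any groups/info pair related by pvRel
theorem pvFilter_eq (g : PySem.Dict String (List (List (String × String)))) (inf : PySem.Dict String (String × Bool))
    (hrel : pvRel g inf) (hnd : g.keys.Nodup) :
    (g.items.foldl
      (fun (acc : PySem.Dict String (List (List (String × String)))) p =>
        if 2 ≤ (PySem.Set.ofList (p.2.map pvSeries)).length then acc.insert p.1 p.2 else acc)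
      PySem.Dict.empty)
    = (g.items.foldl
      (fun (acc : PySem.Dict String (List (List (String × String)))) p =>
        if (inf.getD p.1 ("", false)).2 = true then acc.insert p.1 p.2 else acc)
      PySem.Dict.empty) := by
  refine PySem.List.foldl_congr_mem _ _ _ _ ?_
  intro acc p hp
  obtain ⟨e1, ms1⟩ := p
  have hget : g.get? e1 = some ms1 := PySem.Dict.get?_of_mem_items _ hp hnd
  have hgd : g.getD e1 [] = ms1 := PySem.Dict.getD_of_get?_eq_some _ [] hget
  have hio := hrel e1
  rw [hgd] at hio
  rcases ms1 with _ | ⟨mh, mt⟩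
  · simp only [pvInfoOk] at hio
    have hfl : (inf.getD e1 ("", false)).2 = false := by
      rw [PySem.Dict.getD_eq_get?_getD, hio]; rfl
    refine if_congr ?_ rfl rfl
    rw [hfl]
    simp
  · simp only [pvInfoOk] at hio
    have hflag : (inf.getD e1 ("", false)).2
        = ((mh :: mt).any (fun x => pvSeries x != pvSeries mh)) := by
      rw [PySem.Dict.getD_eq_get?_getD, hio]; rfl
    refine if_congr ?_ rfl rfl
    rw [hflag]
    exact pvCond_iff mh mt

-- ===== VERDICT (by name: the statement is the Claim_ definition above) =====
theorem group_by_entity_spec : Claim_equal_group_by_entity := by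
  intro markets _ _
  unfold Spec_group_by_entity
  have hA : group_by_entity markets
      = ((markets.foldl pvStepA PySem.Dict.empty).items.foldl
          (fun acc p => if 2 ≤ (PySem.Set.ofList (p.2.map pvSeries)).length then acc.insert p.1 p.2 else acc)
          PySem.Dict.empty).items := rfl
  have hB : group_by_entity_alt markets
      = (((markets.foldl pvStepB (PySem.Dict.empty, PySem.Dict.empty)).1.items.foldl
          (fun acc p => if ((markets.foldl pvStepB (PySem.Dict.empty, PySem.Dict.empty)).2.getD p.1 ("", false)).2
            then acc.insert p.1 p.2 else acc)
          PySem.Dict.empty).items) := rfl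
  rw [hA, hB]
  have hfst : (markets.foldl pvStepB (PySem.Dict.empty, PySem.Dict.empty)).1
      = markets.foldl pvStepA PySem.Dict.empty := pvFoldB_fst markets _
  have hrel : pvRel (markets.foldl pvStepB (PySem.Dict.empty, PySem.Dict.empty)).1
      (markets.foldl pvStepB (PySem.Dict.empty, PySem.Dict.empty)).2 := by
    apply pvRel_fold
    intro e
    simp [pvInfoOk, PySem.Dict.getD_empty, PySem.Dict.get?_empty]
  have hnd : (markets.foldl pvStepB (PySem.Dict.empty, PySem.Dict.empty)).1.keys.Nodup := by
    rw [hfst]; exact pvGroups_nodup_keys markets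
  rw [← hfst]
  exact congrArg PySem.Dict.items
    (pvFilter_eq (markets.foldl pvStepB (PySem.Dict.empty, PySem.Dict.empty)).1
      (markets.foldl pvStepB (PySem.Dict.empty, PySem.Dict.empty)).2 hrel hnd)
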